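-- pv_equiv track=rewrite | github.com/OakAndClay/Python-Scripts | FastenerParser.py | cellItems
-- ===== SOURCE A (Python) =====
-- def parens(cell):
--     parens = []
--     step = 0
--     for i in cell:
--         if i == '(':
--             parens += [step]
--             step += 1
--         elif i == ')':
--             parens += [step]
--             step += 1
--         else:
--             step += 1
--     return (parens)
--
-- def cellItems(cell):
--     listOfParens = parens(cell)
--     quant = []
--     uniqueItems = int(((len(listOfParens))/2))
--     start = 1
--     stop = 2
--     if ((len(listOfParens)) % 2) == 0:
--         for i in range(uniqueItems):
--             if i == (uniqueItems-1):
--                 quant.append(cell[(listOfParens[start])+1:])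
--             else:
--                 quant.append(cell[(listOfParens[start])+1:(listOfParens[stop])])
--                 start += 2
--                 stop += 2
--         return (quant)
--     else:
--         return ('error - Information format is incorrect')
-- ===== SOURCE B (Python) =====
-- def cellItems(cell):
--     # single streaming pass: paren counter + recording flag + segment buffer
--     count = 0
--     recording = False
--     buf = []
--     out = []
--     for ch in cell:
--         if ch == '(' or ch == ')':
--             if recording:
--                 out.append(''.join(buf))
--                 buf = []
--             count += 1
--             recording = (count % 2 == 0)
--         elif recording:
--             buf.append(ch)
--     if count % 2 == 1:
--         return 'error - Information format is incorrect'
--     if recording: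
--         out.append(''.join(buf))
--     return out
-- ===== Notes on version B (the rewrite author's own statement) =====
-- stated objective: simpler
-- what changed: Replaced A's two-phase scheme (collect every paren index, then slice index pairs with a start/stop counter loop) by a single streaming pass over the characters with a paren counter, a recording flag and a segment buffer.
import Mathlib
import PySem

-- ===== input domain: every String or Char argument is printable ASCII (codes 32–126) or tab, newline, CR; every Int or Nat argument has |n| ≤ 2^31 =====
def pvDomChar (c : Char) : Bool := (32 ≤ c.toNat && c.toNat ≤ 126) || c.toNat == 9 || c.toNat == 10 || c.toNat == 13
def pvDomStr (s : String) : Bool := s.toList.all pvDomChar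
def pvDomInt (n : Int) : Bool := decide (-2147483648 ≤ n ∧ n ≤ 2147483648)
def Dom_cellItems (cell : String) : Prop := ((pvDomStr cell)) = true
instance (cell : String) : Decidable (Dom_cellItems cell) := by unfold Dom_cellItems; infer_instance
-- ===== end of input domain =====

-- B replaces A's two-phase "collect all paren indices, then slice index pairs" by one
-- streaming pass with a paren counter, a recording flag and a segment buffer (objective:
-- simpler / one pass; same asymptotic cost).

-- ===== PORT A =====
-- helper 'parens': foldl over the characters carrying (collected indices, step counter)
def parensA (cell : String) : List Nat :=
  (cell.toList.foldl
    (fun (st : List Nat × Nat) i =>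
      if i = '(' then (st.1 ++ [st.2], st.2 + 1)
      else if i = ')' then (st.1 ++ [st.2], st.2 + 1)
      else (st.1, st.2 + 1))
    ([], 0)).1

-- the 'for i in range(uniqueItems)' loop with mutable start/stop/quant; indices start/stop
-- are always in range when |P| = 2*m (so getD is exact for Python's listOfParens[start]);
-- cell[a:b] with 0 ≤ a, b is (take b).drop a, cell[a:] is drop a.
def loopA (l : List Char) (P : List Nat) (m : Nat) : Nat → Nat → Nat → List String → List String
  | i, start, stop, quant =>
    if _h : i < m then
      if i = m - 1 then
        loopA l P m (i + 1) start stop (quant ++ [String.ofList (l.drop (P.getD start 0 + 1))])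
      else
        loopA l P m (i + 1) (start + 2) (stop + 2)
          (quant ++ [String.ofList ((l.take (P.getD stop 0)).drop (P.getD start 0 + 1))])
    else quant
  termination_by i => m - i

def cellItems (cell : String) : List String :=
  let listOfParens := parensA cell
  let uniqueItems := listOfParens.length / 2  -- int(len(..)/2): exact (floor of n/2)
  if listOfParens.length % 2 = 0 then
    loopA cell.toList listOfParens uniqueItems 0 1 2 []
  else ["error - Information format is incorrect"]
    -- Python returns the bare str here (not a list); these inputs are excluded by Pre_

-- ===== PORT B =====
-- one foldl carrying (count, recording, buf, out), then the two final ifs of Source B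
def bstep (st : Nat × Bool × List Char × List String) (ch : Char) :
    Nat × Bool × List Char × List String :=
  let (count, recording, buf, out) := st
  if ch = '(' ∨ ch = ')' then
    let out' := if recording then out ++ [String.ofList buf] else out
    let buf' : List Char := if recording then [] else buf
    (count + 1, (count + 1) % 2 == 0, buf', out')
  else if recording then (count, recording, buf ++ [ch], out)
  else st

def cellItems_alt (cell : String) : List String :=
  let st := cell.toList.foldl bstep (0, false, [], [])
  if st.1 % 2 = 1 then ["error - Information format is incorrect"]
    -- Python returns the bare str here (not a list); excluded by Pre_
  else if st.2.1 then st.2.2.2 ++ [String.ofList st.2.2.1] else st.2.2.2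

-- ===== PRECONDITION & SPEC =====
-- Pre_ excludes inputs with an odd number of parentheses: there Python A (and B) return the
-- bare str 'error - Information format is incorrect', which is not a value of type list[str].
def Pre_cellItems (cell : String) : Prop :=
  (cell.toList.countP (fun c => c = '(' ∨ c = ')')) % 2 = 0
instance (cell : String) : Decidable (Pre_cellItems cell) := by unfold Pre_cellItems; infer_instance
def pvWitness_cellItems : String := "q(2)x(3)y"

def Spec_cellItems (cell : String) (out : List String) : Prop := out = cellItems_alt cell
instance (cell : String) (out : List String) : Decidable (Spec_cellItems cell out) := by unfold Spec_cellItems; infer_instance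

-- ===== CLAIM (what is proved, stated in full; the proofs are below) =====
def Claim_equal_cellItems : Prop := ∀ (cell : String), Dom_cellItems cell → Pre_cellItems cell → Spec_cellItems cell (cellItems cell)

-- ===== LEMMAS AND PROOFS =====

def isParen (c : Char) : Bool := c = '(' ∨ c = ')'

-- positions of the paren characters
def P : List Char → List Nat
  | [] => []
  | c :: t => if isParen c then 0 :: (P t).map (· + 1) else (P t).map (· + 1)

-- A's slicing scheme on a position list: pair up, last position slices to the end
def go (l : List Char) : List Nat → List (List Char)
  | [] => []
  | [p] => [l.drop (p + 1)]
  | p :: q :: rest => (l.take q).drop (p + 1) :: go l rest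

-- B's streaming scheme, as clean mutual recursion on the characters:
-- G0 = no paren seen yet, G1 = odd count (not recording), G2 = even count (recording into buf)
mutual
def G0 : List Char → List (List Char)
  | [] => []
  | c :: t => if isParen c then G1 t else G0 t
def G1 : List Char → List (List Char)
  | [] => []
  | c :: t => if isParen c then G2 t [] else G1 t
def G2 : List Char → List Char → List (List Char)
  | [], buf => [buf]
  | c :: t, buf => if isParen c then buf :: G1 t else G2 t (buf ++ [c])
end

def goRec (t : List Char) : List (List Char) :=
  match P t with
  | [] => [t]
  | q :: rest => t.take q :: go t rest

theorem parensA_inv (l : List Char) : ∀ (acc : List Nat) (s : Nat),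
    (l.foldl (fun (st : List Nat × Nat) i =>
      if i = '(' then (st.1 ++ [st.2], st.2 + 1)
      else if i = ')' then (st.1 ++ [st.2], st.2 + 1)
      else (st.1, st.2 + 1)) (acc, s)).1 = acc ++ (P l).map (· + s) := by
  induction l with
  | nil => intro acc s; simp [P]
  | cons c t ih =>
    intro acc s
    by_cases hc : isParen c
    · have h1 : (c = '(' ) ∨ (c = ')') := by
        simp [isParen] at hc; exact hc
      rcases h1 with h | h <;>
        · simp [h, P, isParen, List.foldl_cons, ih, List.map_map]
          exact fun x _ => by omega
    · have h1 : ¬ c = '(' ∧ ¬ c = ')' := by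
        simp [isParen] at hc; exact hc
      simp [h1.1, h1.2, P, isParen, List.foldl_cons, ih, List.map_map]
      exact fun x _ => by omega

theorem parensA_eq (cell : String) : parensA cell = P cell.toList := by
  have := parensA_inv cell.toList [] 0
  simpa [parensA] using this

theorem go_shift (l : List Char) (k : Nat) : ∀ Q : List Nat,
    go l (Q.map (· + k)) = go (l.drop k) Q := by
  intro Q
  induction Q using go.induct with
  | case1 => simp [go]
  | case2 p =>
    simp only [List.map, go]
    rw [List.drop_drop]
    congr 2
    omega
  | case3 p q rest ih =>
    simp only [List.map, go, ih]
    congr 1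
    rw [List.drop_take, List.drop_take, List.drop_drop]
    congr 1
    · omega
    · congr 1
      omega

theorem loopA_inv (l : List Char) (Pn : List Nat) (m : Nat) (hm : Pn.length = 2 * m) :
    ∀ n i quant, m - i = n →
    loopA l Pn m i (2 * i + 1) (2 * i + 2) quant
      = quant ++ (go l (Pn.drop (2 * i + 1))).map String.ofList := by
  intro n
  induction n with
  | zero =>
    intro i quant h
    have hi : ¬ i < m := by omega
    rw [loopA, dif_neg hi]
    have : Pn.drop (2 * i + 1) = [] := List.drop_eq_nil_of_le (by omega)
    simp [this, go]
  | succ n ih =>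
    intro i quant h
    have hi : i < m := by omega
    rw [loopA]
    by_cases hlast : i = m - 1
    · have hidx : 2 * i + 1 < Pn.length := by omega
      have hdrop : Pn.drop (2 * i + 1) = [Pn[2 * i + 1]] := by
        have h1 := List.drop_eq_getElem_cons hidx
        have h2 : Pn.drop (2 * i + 1 + 1) = [] := List.drop_eq_nil_of_le (by omega)
        rw [h1, h2]
      have hgd : Pn.getD (2 * i + 1) 0 = Pn[2 * i + 1] := List.getD_eq_getElem Pn 0 hidx
      rw [dif_pos hi, if_pos hlast, loopA, dif_neg (show ¬ i + 1 < m by omega)]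
      rw [hdrop, hgd]
      simp [go]
    · have hidx1 : 2 * i + 1 < Pn.length := by omega
      have hidx2 : 2 * i + 2 < Pn.length := by omega
      have hdrop : Pn.drop (2 * i + 1) = Pn[2 * i + 1] :: Pn[2 * i + 2] :: Pn.drop (2 * i + 3) := by
        rw [List.drop_eq_getElem_cons hidx1]
        congr 1
        rw [List.drop_eq_getElem_cons hidx2]
      have hgd1 : Pn.getD (2 * i + 1) 0 = Pn[2 * i + 1] := List.getD_eq_getElem Pn 0 hidx1
      have hgd2 : Pn.getD (2 * i + 2) 0 = Pn[2 * i + 2] := List.getD_eq_getElem Pn 0 hidx2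
      rw [dif_pos hi, if_neg hlast]
      have harith1 : 2 * i + 1 + 2 = 2 * (i + 1) + 1 := by omega
      have harith2 : 2 * i + 2 + 2 = 2 * (i + 1) + 2 := by omega
      rw [harith1, harith2, ih (i + 1) _ (by omega)]
      rw [hdrop, hgd1, hgd2]
      have h3 : 2 * (i + 1) + 1 = 2 * i + 3 := by omega
      simp [go, h3]

theorem goRec_eq (c : Char) (t : List Char) :
    go (c :: t) (0 :: (P t).map (· + 1)) = goRec t := by
  unfold goRec
  cases hp : P t with
  | nil => simp [go]
  | cons q rest =>
    simp only [List.map]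
    rw [go]
    have hshift : go (c :: t) (rest.map (· + 1)) = go t rest := by
      have := go_shift (c :: t) 1 rest
      simpa using this
    rw [hshift]
    simp [List.take_succ_cons]

theorem G2_glue (t : List Char) : ∀ buf : List Char,
    G2 t buf = (buf ++ (G2 t []).headI) :: (G2 t []).tail := by
  induction t with
  | nil => intro buf; simp [G2]
  | cons c t ih =>
    intro buf
    by_cases hc : isParen c
    · simp [G2, hc]
    · rw [G2, if_neg hc, ih (buf ++ [c]), G2, if_neg hc, ih ([] ++ [c])]
      simp

-- main A-side characterisation: go on paren positions = the G functions
theorem M_main (t : List Char) :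
    ((P t).length % 2 = 0 → go t ((P t).drop 1) = G0 t)
    ∧ ((P t).length % 2 = 1 → go t (P t) = G1 t)
    ∧ ((P t).length % 2 = 0 → G2 t [] = goRec t) := by
  induction t with
  | nil => refine ⟨fun _ => by simp [P, go, G0], fun h => by simp [P] at h, fun _ => by simp [G2, goRec, P]⟩
  | cons c t ih =>
    obtain ⟨ih0, ih1, ih2⟩ := ih
    by_cases hc : isParen c
    · have hP : P (c :: t) = 0 :: (P t).map (· + 1) := by simp [P, hc]
      refine ⟨?_, ?_, ?_⟩
      · intro hev
        have hodd : (P t).length % 2 = 1 := by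
          rw [hP] at hev; simp at hev; omega
        rw [hP]
        simp only [List.drop_succ_cons, List.drop_zero]
        have := go_shift (c :: t) 1 (P t)
        simp only [List.drop_succ_cons, List.drop_zero] at this
        rw [this, ih1 hodd]
        simp [G0, hc]
      · intro hodd
        have hev : (P t).length % 2 = 0 := by
          rw [hP] at hodd; simp at hodd; omega
        rw [hP, goRec_eq, ← ih2 hev]
        simp [G1, hc]
      · intro hev
        have hodd : (P t).length % 2 = 1 := by
          rw [hP] at hev; simp at hev; omega
        rw [G2, if_pos hc]
        unfold goRec
        rw [hP]
        simp only [List.take_zero]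
        have hshift : go (c :: t) ((P t).map (· + 1)) = go t (P t) := by
          have := go_shift (c :: t) 1 (P t)
          simpa using this
        rw [hshift, ih1 hodd]
    · have hP : P (c :: t) = (P t).map (· + 1) := by simp [P, hc]
      refine ⟨?_, ?_, ?_⟩
      · intro hev
        have hev' : (P t).length % 2 = 0 := by rw [hP] at hev; simpa using hev
        rw [hP]
        have hdm : ((P t).map (· + 1)).drop 1 = ((P t).drop 1).map (· + 1) := by
          simp
        rw [hdm]
        have := go_shift (c :: t) 1 ((P t).drop 1)
        simp only [List.drop_succ_cons, List.drop_zero] at this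
        rw [this, ih0 hev']
        simp [G0, hc]
      · intro hodd
        have hodd' : (P t).length % 2 = 1 := by rw [hP] at hodd; simpa using hodd
        rw [hP]
        have := go_shift (c :: t) 1 (P t)
        simp only [List.drop_succ_cons, List.drop_zero] at this
        rw [this, ih1 hodd']
        simp [G1, hc]
      · intro hev
        have hev' : (P t).length % 2 = 0 := by rw [hP] at hev; simpa using hev
        rw [G2, if_neg hc, G2_glue t ([] ++ [c]), ih2 hev']
        cases hp : P t with
        | nil =>
          have h1 : goRec t = [t] := by unfold goRec; rw [hp]
          have h2 : goRec (c :: t) = [c :: t] := by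
            unfold goRec; rw [hP, hp]; simp
          rw [h1, h2]
          simp
        | cons q rest =>
          have hshift : go (c :: t) (rest.map (· + 1)) = go t rest := by
            have := go_shift (c :: t) 1 rest
            simpa using this
          have h1 : goRec t = t.take q :: go t rest := by unfold goRec; rw [hp]
          have h2 : goRec (c :: t) = (c :: t.take q) :: go t rest := by
            unfold goRec
            rw [hP, hp]
            simp only [List.map]
            rw [List.take_succ_cons, hshift]
          rw [h1, h2]
          simp

-- B-side: the foldl invariant over the three reachable states
theorem stream_inv (l : List Char) :
    (∀ (count : Nat) (out : List String), count % 2 = 0 → (P l).length % 2 = 0 →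
      (let st := l.foldl bstep (count, false, [], out)
       if st.1 % 2 = 1 then ["error - Information format is incorrect"]
       else if st.2.1 then st.2.2.2 ++ [String.ofList st.2.2.1] else st.2.2.2)
        = out ++ (G0 l).map String.ofList)
    ∧ (∀ (count : Nat) (out : List String), count % 2 = 1 → (P l).length % 2 = 1 →
      (let st := l.foldl bstep (count, false, [], out)
       if st.1 % 2 = 1 then ["error - Information format is incorrect"]
       else if st.2.1 then st.2.2.2 ++ [String.ofList st.2.2.1] else st.2.2.2)
        = out ++ (G1 l).map String.ofList)
    ∧ (∀ (count : Nat) (out : List String) (buf : List Char), count % 2 = 0 → (P l).length % 2 = 0 →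
      (let st := l.foldl bstep (count, true, buf, out)
       if st.1 % 2 = 1 then ["error - Information format is incorrect"]
       else if st.2.1 then st.2.2.2 ++ [String.ofList st.2.2.1] else st.2.2.2)
        = out ++ (G2 l buf).map String.ofList) := by
  induction l with
  | nil =>
    refine ⟨?_, ?_, ?_⟩
    · intro count out hc _
      simp only [List.foldl_nil]
      rw [if_neg (by omega)]
      simp [G0]
    · intro count out _ habs
      simp [P] at habs
    · intro count out buf hc _
      simp only [List.foldl_nil]
      rw [if_neg (by omega)]
      simp [G2]
  | cons c t ih =>
    obtain ⟨ih0, ih1, ih2⟩ := ih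
    by_cases hc : isParen c
    · have hcc : (c = '(' ∨ c = ')') := by simpa [isParen] using hc
      have hPl : (P (c :: t)).length = (P t).length + 1 := by simp [P, hc]
      refine ⟨?_, ?_, ?_⟩
      · intro count out h0 hev
        have hstep : bstep (count, false, [], out) c
            = (count + 1, (count + 1) % 2 == 0, [], out) := by
          simp [bstep, hcc]
        have hb : ((count + 1) % 2 == 0) = false := by simp; omega
        rw [List.foldl_cons, hstep, hb,
          ih1 (count + 1) out (by omega) (by rw [hPl] at hev; omega)]
        simp [G0, hc]
      · intro count out h1 hodd
        have hstep : bstep (count, false, [], out) c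
            = (count + 1, (count + 1) % 2 == 0, [], out) := by
          simp [bstep, hcc]
        have hb : ((count + 1) % 2 == 0) = true := by simp; omega
        rw [List.foldl_cons, hstep, hb,
          ih2 (count + 1) out [] (by omega) (by rw [hPl] at hodd; omega)]
        simp [G1, hc]
      · intro count out buf h0 hev
        have hstep : bstep (count, true, buf, out) c
            = (count + 1, (count + 1) % 2 == 0, [], out ++ [String.ofList buf]) := by
          simp [bstep, hcc]
        have hb : ((count + 1) % 2 == 0) = false := by simp; omega
        rw [List.foldl_cons, hstep, hb,
          ih1 (count + 1) (out ++ [String.ofList buf]) (by omega) (by rw [hPl] at hev; omega)]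
        simp [G2, hc]
    · have hcc : ¬ (c = '(' ∨ c = ')') := by simpa [isParen] using hc
      have hPl : (P (c :: t)).length = (P t).length := by simp [P, hc]
      refine ⟨?_, ?_, ?_⟩
      · intro count out h0 hev
        have hstep : bstep (count, false, [], out) c = (count, false, [], out) := by
          simp [bstep, hcc]
        rw [List.foldl_cons, hstep, ih0 count out h0 (by rw [hPl] at hev; omega)]
        simp [G0, hc]
      · intro count out h1 hodd
        have hstep : bstep (count, false, [], out) c = (count, false, [], out) := by
          simp [bstep, hcc]
        rw [List.foldl_cons, hstep, ih1 count out h1 (by rw [hPl] at hodd; omega)]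
        simp [G1, hc]
      · intro count out buf h0 hev
        have hstep : bstep (count, true, buf, out) c = (count, true, buf ++ [c], out) := by
          simp [bstep, hcc]
        rw [List.foldl_cons, hstep, ih2 count out (buf ++ [c]) h0 (by rw [hPl] at hev; omega)]
        simp [G2, hc]

theorem countP_isParen (l : List Char) : l.countP isParen = (P l).length := by
  induction l with
  | nil => simp [P]
  | cons c t ih =>
    rw [List.countP_cons]
    by_cases hc : isParen c
    · rw [hc]
      simp [P, hc, ih]
    · rw [Bool.eq_false_iff.mpr hc]
      simp [P, hc, ih]

theorem countP_eq_P_length (l : List Char) :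
    l.countP (fun c => decide (c = '(' ∨ c = ')')) = (P l).length := by
  rw [← countP_isParen l]
  rfl

-- ===== VERDICT (by name: the statement is the Claim_ definition above) =====
theorem cellItems_spec : Claim_equal_cellItems := by
  intro cell _ hpre
  unfold Spec_cellItems
  have hPlen : (P cell.toList).length % 2 = 0 := by
    unfold Pre_cellItems at hpre
    rw [countP_eq_P_length] at hpre
    exact hpre
  -- A side
  have hA : cellItems cell = (go cell.toList ((P cell.toList).drop 1)).map String.ofList := by
    unfold cellItems
    rw [parensA_eq]
    rw [if_pos hPlen]
    have hm : (P cell.toList).length = 2 * ((P cell.toList).length / 2) := by omega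
    have := loopA_inv cell.toList (P cell.toList) ((P cell.toList).length / 2) hm
      ((P cell.toList).length / 2) 0 [] (by omega)
    simpa using this
  -- B side
  have hB : cellItems_alt cell = (G0 cell.toList).map String.ofList := by
    unfold cellItems_alt
    have := (stream_inv cell.toList).1 0 [] (by omega) hPlen
    simpa using this
  rw [hA, hB, (M_main cell.toList).1 hPlen]
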